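-- pv_equiv track=rewrite | github.com/HLFrye/AoC2018 | Day2/python/main.py | has_repeat
-- ===== SOURCE A (Python) =====
-- def has_repeat(repeat_count, line):
--   components = {}
--   for char in line:
--     if char in components:
--       components[char] = components[char] + 1
--     else:
--       components[char] = 1
--   for key,value in components.items():
--     if value == repeat_count:
--       return True
--   return False
-- ===== SOURCE B (Python) =====
-- def has_repeat(repeat_count, line):
--     # Group-and-discard recursion: take the first remaining character, split the
--     # remainder into its group and the rest; succeed if the group has the target
--     # size, otherwise recurse on the rest. No frequency table is maintained.
--     chars = list(line)
--     while chars: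
--         c = chars[0]
--         group = [x for x in chars if x == c]
--         if len(group) == repeat_count:
--             return True
--         chars = [x for x in chars if x != c]
--     return False
-- ===== Notes on version B (the rewrite author's own statement) =====
-- stated objective: alternative
-- what changed: Replaces A's build-a-frequency-dict-then-scan-items strategy with a group-and-discard recursion: repeatedly split the remaining characters into the first character's group and the rest, test the group's size, and continue on the shrunken remainder; no table is built.
import Mathlib
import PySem

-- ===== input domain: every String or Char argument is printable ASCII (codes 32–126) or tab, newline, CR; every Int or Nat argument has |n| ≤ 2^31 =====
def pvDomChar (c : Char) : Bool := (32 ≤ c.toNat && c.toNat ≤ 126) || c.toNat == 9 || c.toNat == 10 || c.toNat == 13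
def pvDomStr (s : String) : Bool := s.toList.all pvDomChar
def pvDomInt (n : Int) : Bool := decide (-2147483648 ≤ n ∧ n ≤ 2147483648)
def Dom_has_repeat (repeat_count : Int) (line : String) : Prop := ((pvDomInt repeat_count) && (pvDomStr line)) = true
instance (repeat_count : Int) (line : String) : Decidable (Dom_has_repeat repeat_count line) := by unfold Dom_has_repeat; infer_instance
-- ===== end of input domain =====

-- B replaces A's frequency dictionary with a group-and-discard recursion over the remaining characters (alternative decomposition, no table).

-- ===== PORT A =====
-- A: build a char→count dict in one pass, then scan its items for a value equal to repeat_count.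
def has_repeat (repeat_count : Int) (line : String) : Bool :=
  let components := line.toList.foldl
    (fun d c => if d.contains c then d.insert c (d.getD c 0 + 1) else d.insert c 1)
    PySem.Dict.empty
  components.items.any (fun kv => kv.2 == repeat_count)

-- ===== PORT B =====
-- B: while characters remain, split off the first character's whole group,
-- test its size, and continue on the rest (the while loop of Source B as recursion).
def has_repeat_alt_go (n : Int) : List Char → Bool
  | [] => false
  | c :: rest =>
    if ((((c :: rest).filter (fun x => x == c)).length : Int) == n) then true
    else has_repeat_alt_go n ((c :: rest).filter (fun x => x != c))
termination_by xs => xs.length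
decreasing_by
  simp only [List.filter_cons, bne_self_eq_false]
  exact Nat.lt_succ_of_le (List.length_filter_le _ _)

def has_repeat_alt (repeat_count : Int) (line : String) : Bool :=
  has_repeat_alt_go repeat_count line.toList

-- ===== PRECONDITION & SPEC =====
def Spec_has_repeat (repeat_count : Int) (line : String) (out : Bool) : Prop := out = has_repeat_alt repeat_count line
instance (repeat_count : Int) (line : String) (out : Bool) : Decidable (Spec_has_repeat repeat_count line out) := by unfold Spec_has_repeat; infer_instance

-- ===== CLAIM =====
def Claim_equal_has_repeat : Prop := ∀ (repeat_count : Int) (line : String), Dom_has_repeat repeat_count line → Spec_has_repeat repeat_count line (has_repeat repeat_count line)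

-- ===== LEMMAS AND PROOFS =====

-- A's branching update is exactly the counter update: when the key is absent, getD gives 0.
lemma fold_eq_counter (xs : List Char) :
    xs.foldl (fun d c => if d.contains c then d.insert c (d.getD c 0 + 1) else d.insert c 1)
      PySem.Dict.empty = PySem.Dict.counter xs := by
  rw [← PySem.Dict.foldl_insert_getD_add_one_eq_counter]
  congr 1
  funext d c
  by_cases h : d.contains c = true
  · simp [h]
  · simp only [Bool.not_eq_true] at h
    rw [PySem.Dict.getD_of_not_contains (h := h)]
    simp [h]

-- A returns true exactly when some character of the line occurs repeat_count times.
lemma hasRepeat_iff (n : Int) (xs : List Char) :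
    (((PySem.Dict.counter xs).items.any (fun kv => kv.2 == n)) = true)
      ↔ ∃ c ∈ xs, (xs.count c : Int) = n := by
  rw [PySem.Dict.items_counter, List.any_map]
  simp only [List.any_eq_true, Function.comp, beq_iff_eq]
  constructor
  · rintro ⟨c, hc, h⟩
    exact ⟨c, (PySem.Set.mem_ofList xs c).mp hc, h⟩
  · rintro ⟨c, hc, h⟩
    exact ⟨c, (PySem.Set.mem_ofList xs c).mpr hc, h⟩

-- Discarding the first character's whole group preserves every other character's count.
lemma count_filter_ne (c d : Char) (h : d ≠ c) (l : List Char) :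
    (l.filter (fun x => x != c)).count d = l.count d := by
  induction l with
  | nil => rfl
  | cons a t ih =>
    by_cases ha : a = c <;> simp [ha, Ne.symm h, List.count_cons, ih]

-- B's group-and-discard loop decides the same proposition: the first group's size
-- is the count of its character, and discarding it preserves all other counts.
lemma go_iff (n : Int) (xs : List Char) :
    has_repeat_alt_go n xs = true ↔ ∃ c ∈ xs, (xs.count c : Int) = n := by
  induction xs using has_repeat_alt_go.induct n with
  | case1 => simp [has_repeat_alt_go]
  | case2 c rest heq =>
    rw [has_repeat_alt_go, if_pos heq]
    simp only [beq_iff_eq] at heq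
    rw [← List.count_eq_length_filter] at heq
    exact ⟨fun _ => ⟨c, List.mem_cons_self, heq⟩, fun _ => rfl⟩
  | case3 c rest heq ih =>
    rw [has_repeat_alt_go, if_neg heq, ih]
    simp only [beq_iff_eq] at heq
    rw [← List.count_eq_length_filter] at heq
    constructor
    · rintro ⟨d, hd, hcnt⟩
      have hdne : d ≠ c := by
        rintro rfl
        rcases List.mem_filter.mp hd with ⟨-, hne⟩
        simp at hne
      rw [count_filter_ne c d hdne] at hcnt
      exact ⟨d, (List.mem_filter.mp hd).1, hcnt⟩
    · rintro ⟨d, hd, hcnt⟩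
      have hdne : d ≠ c := by rintro rfl; exact heq hcnt
      refine ⟨d, List.mem_filter.mpr ⟨hd, by simp [hdne]⟩, ?_⟩
      rw [count_filter_ne c d hdne]; exact hcnt

-- ===== VERDICT =====
theorem has_repeat_spec : Claim_equal_has_repeat := by
  intro repeat_count line _
  unfold Spec_has_repeat has_repeat has_repeat_alt
  simp only [fold_eq_counter]
  cases h : has_repeat_alt_go repeat_count line.toList with
  | false =>
    rw [Bool.eq_false_iff]
    intro hA
    have hgo := (go_iff repeat_count line.toList).mpr ((hasRepeat_iff repeat_count line.toList).mp hA)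
    rw [h] at hgo; cases hgo
  | true => exact (hasRepeat_iff repeat_count line.toList).mpr ((go_iff _ _).mp h)
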